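-- pv_equiv track=rewrite | github.com/dlmee/wikivecs | scripts/processing_scripts/process_links_iterative.py | process_links_iteratively
-- ===== SOURCE A (Python) =====
-- def process_links_iteratively(master_dict, key, max_depth):
--     """Iteratively process links up to a specified depth and count the traversals."""
--     connections = {}
--     queue = [(key, 0)]  # Initialize the queue with the starting key and depth
--
--     while queue:
--         current_key, depth = queue.pop(0)  # Dequeue the next key-depth pair
--         if depth < max_depth and current_key in master_dict and isinstance(master_dict[current_key ], list):
--             for sub_key in master_dict[current_key]:
--                 if sub_key not in connections:
--                     connections[sub_key] = 0
--                 connections[sub_key] += 1  # Count the traversal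
--                 queue.append((sub_key, depth + 1))  # Enqueue the sub_key with incremented depth
--
--     connections = dict(sorted(connections.items(), key=lambda item: item[1], reverse=True))  # Sort connections by value
--     return connections
-- ===== SOURCE B (Python) =====
-- def process_links_iteratively(master_dict, key, max_depth):
--     """Layered DP: propagate per-layer walk counts across depths instead of
--     enumerating every walk individually."""
--     counts = {}
--     frontier = {key: 1}
--     depth = 0
--     while depth < max_depth and frontier:
--         new_frontier = {}
--         for node, cnt in frontier.items():
--             for child in master_dict.get(node, []):
--                 counts[child] = counts.get(child, 0) + cnt
--                 new_frontier[child] = new_frontier.get(child, 0) + cnt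
--         frontier = new_frontier
--         depth += 1
--     return dict(sorted(counts.items(), key=lambda item: item[1], reverse=True))
-- ===== Notes on version B (the rewrite author's own statement) =====
-- stated objective: alternative
-- what changed: Replaced the walk-enumerating BFS queue (one queue entry per walk) by a layered dynamic program that propagates aggregated per-node walk counts from one depth layer to the next and stops when the frontier empties.
import Mathlib
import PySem

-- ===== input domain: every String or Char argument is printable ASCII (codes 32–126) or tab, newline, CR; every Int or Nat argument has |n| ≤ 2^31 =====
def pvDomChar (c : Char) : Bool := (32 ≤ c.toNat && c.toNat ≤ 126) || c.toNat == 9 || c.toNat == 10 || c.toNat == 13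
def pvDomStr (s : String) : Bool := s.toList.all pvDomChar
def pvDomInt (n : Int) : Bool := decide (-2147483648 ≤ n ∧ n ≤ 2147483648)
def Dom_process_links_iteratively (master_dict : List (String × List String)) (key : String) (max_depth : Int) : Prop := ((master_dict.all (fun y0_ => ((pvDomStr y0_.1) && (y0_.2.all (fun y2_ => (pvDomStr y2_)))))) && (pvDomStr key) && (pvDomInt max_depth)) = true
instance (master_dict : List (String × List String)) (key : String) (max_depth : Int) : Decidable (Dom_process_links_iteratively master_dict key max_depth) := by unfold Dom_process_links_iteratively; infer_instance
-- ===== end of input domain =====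

-- B replaces A's walk-enumerating BFS queue by a layered dynamic program over
-- per-depth walk-count dictionaries; same return value, proved below.

-- ===== PORT A =====
-- Python dict lookup on the association list (first match).
def pvGetLinks : List (String × List String) → String → Option (List String)
  | [], _ => none
  | (k', v) :: rest, k => if k' == k then some v else pvGetLinks rest k

-- upper bound on any link-list length, used only for the termination measure of A's queue loop
def pvMaxLen (md : List (String × List String)) : Nat :=
  md.foldr (fun p m => max p.2.length m) 0

theorem pvGetLinks_length_le (md : List (String × List String)) (k : String) (l : List String)
    (h : pvGetLinks md k = some l) : l.length ≤ pvMaxLen md := by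
  induction md with
  | nil => simp [pvGetLinks] at h
  | cons p rest ih =>
      obtain ⟨k', v⟩ := p
      unfold pvGetLinks at h
      unfold pvMaxLen
      by_cases hk : (k' == k) = true
      · simp only [hk, if_pos] at h
        cases h
        simp [List.foldr]
      · simp only [hk] at h
        simp only [List.foldr]
        exact le_trans (ih h) (le_max_right _ _)

def pvWeight (md : List (String × List String)) (m d : Int) : Nat :=
  (pvMaxLen md + 1) ^ (m - d).toNat

def pvMeas (md : List (String × List String)) (m : Int) (q : List (String × Int)) : Nat :=
  (q.map (fun p => pvWeight md m p.2)).sum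

theorem pvWeight_step (md : List (String × List String)) {m d : Int} {n : Nat}
    (hd : d < m) (hlen : n ≤ pvMaxLen md) :
    n * pvWeight md m (d + 1) < pvWeight md m d := by
  unfold pvWeight
  have he : (m - d).toNat = (m - (d + 1)).toNat + 1 := by omega
  have hx : 0 < (pvMaxLen md + 1) ^ (m - (d + 1)).toNat := Nat.pow_pos (by omega)
  rw [he, pow_succ]
  calc n * (pvMaxLen md + 1) ^ (m - (d + 1)).toNat
      ≤ pvMaxLen md * (pvMaxLen md + 1) ^ (m - (d + 1)).toNat := Nat.mul_le_mul_right _ hlen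
    _ < (pvMaxLen md + 1) * (pvMaxLen md + 1) ^ (m - (d + 1)).toNat :=
        Nat.mul_lt_mul_of_pos_right (by omega) hx
    _ = (pvMaxLen md + 1) ^ (m - (d + 1)).toNat * (pvMaxLen md + 1) := Nat.mul_comm _ _

theorem pvMeas_const (md : List (String × List String)) (m d : Int) (zs : List String) :
    ((zs.map (fun s => (s, d + 1))).map (fun p => pvWeight md m p.2)).sum
      = zs.length * pvWeight md m (d + 1) := by
  induction zs with
  | nil => simp
  | cons z zs ih =>
      simp only [List.map_cons, List.sum_cons, List.length_cons, ih, Nat.succ_mul]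
      omega

-- literal port of A's while-queue loop (pop front; count each traversal; enqueue children)
def pvALoop (md : List (String × List String)) (m : Int) :
    List (String × Int) → PySem.Dict String Int → PySem.Dict String Int
  | [], conns => conns
  | (k, d) :: q, conns =>
    if h : d < m ∧ (pvGetLinks md k).isSome then
      pvALoop md m (q ++ ((pvGetLinks md k).getD []).map (fun s => (s, d + 1)))
        (((pvGetLinks md k).getD []).foldl
          (fun c s =>
            let c' := if c.contains s then c else c.insert s 0
            c'.insert s (c'.getD s 0 + 1))
          conns)
    else pvALoop md m q conns
termination_by q _ => pvMeas md m q
decreasing_by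
  · obtain ⟨l, hl⟩ := Option.isSome_iff_exists.mp h.2
    have hlen := pvGetLinks_length_le md k l hl
    have hstep := pvWeight_step md (n := l.length) h.1 hlen
    simp only [pvMeas, List.map_append, List.sum_append, List.map_cons, List.sum_cons]
    rw [pvMeas_const, hl]
    simp only [Option.getD_some]
    omega
  · simp only [pvMeas, List.map_cons, List.sum_cons]
    have : 0 < pvWeight md m d := Nat.pow_pos (by omega)
    omega

def process_links_iteratively (master_dict : List (String × List String)) (key : String) (max_depth : Int) : List (String × Int) :=
  PySem.List.sorted
    (pvALoop master_dict max_depth [(key, 0)] PySem.Dict.empty).items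
    (fun item => item.2) true

-- ===== PORT B =====
-- one depth layer: for node,cnt in frontier.items(): for child in master_dict.get(node, []):
--   counts[child] += cnt; new_frontier[child] += cnt
def pvBLayer (md : List (String × List String))
    (counts frontier : PySem.Dict String Int) :
    PySem.Dict String Int × PySem.Dict String Int :=
  frontier.items.foldl
    (fun acc item =>
      ((pvGetLinks md item.1).getD []).foldl
        (fun p child =>
          (p.1.insert child (p.1.getD child 0 + item.2),
           p.2.insert child (p.2.getD child 0 + item.2)))
        acc)
    (counts, PySem.Dict.empty)

-- while depth < max_depth and frontier: one layer per iteration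
def pvBLoop (md : List (String × List String)) :
    Nat → PySem.Dict String Int → PySem.Dict String Int → PySem.Dict String Int
  | 0, counts, _ => counts
  | n + 1, counts, frontier =>
      if frontier.items.isEmpty then counts
      else pvBLoop md n (pvBLayer md counts frontier).1 (pvBLayer md counts frontier).2

def process_links_iteratively_alt (master_dict : List (String × List String)) (key : String) (max_depth : Int) : List (String × Int) :=
  PySem.List.sorted
    (pvBLoop master_dict max_depth.toNat PySem.Dict.empty (PySem.Dict.empty.insert key 1)).items
    (fun item => item.2) true

-- ===== PRECONDITION & SPEC =====
def Spec_process_links_iteratively (master_dict : List (String × List String)) (key : String) (max_depth : Int) (out : List (String × Int)) : Prop := out = process_links_iteratively_alt master_dict key max_depth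
instance (master_dict : List (String × List String)) (key : String) (max_depth : Int) (out : List (String × Int)) : Decidable (Spec_process_links_iteratively master_dict key max_depth out) := by unfold Spec_process_links_iteratively; infer_instance

-- ===== CLAIM (what is proved, stated in full; the proofs are below) =====
def Claim_equal_process_links_iteratively : Prop := ∀ (master_dict : List (String × List String)) (key : String) (max_depth : Int), Dom_process_links_iteratively master_dict key max_depth → Spec_process_links_iteratively master_dict key max_depth (process_links_iteratively master_dict key max_depth)

-- ===== LEMMAS AND PROOFS =====

-- children list of a node (empty when absent)
def pvKidsL (md : List (String × List String)) (k : String) : List String :=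
  (pvGetLinks md k).getD []

-- fold of "d[k] = d.get(k,0) + w" update operations
def pvApply (d : PySem.Dict String Int) (ops : List (String × Int)) : PySem.Dict String Int :=
  ops.foldl (fun d p => d.insert p.1 (d.getD p.1 0 + p.2)) d

-- total weight an op list adds to key k
def pvW : List (String × Int) → String → Int
  | [], _ => 0
  | p :: ops, k => (if p.1 = k then p.2 else 0) + pvW ops k

-- first-occurrence dedup, dropping elements of `seen`
def pvDedupA (seen : List String) : List String → List String
  | [] => []
  | x :: xs => if seen.contains x then pvDedupA seen xs else x :: pvDedupA (x :: seen) xs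

-- the stream of all walk endpoints emitted over n further layers from frontier multiset zs
def pvEmit (md : List (String × List String)) : Nat → List String → List String
  | 0, _ => []
  | n + 1, zs => zs.flatMap (pvKidsL md) ++ pvEmit md n (zs.flatMap (pvKidsL md))

def pvOnes (L : List String) : List (String × Int) := L.map (fun c => (c, 1))

-- canonical counter of a multiset list: keys in first-occurrence order, values = multiplicities
def pvCanon (L : List String) : List (String × Int) :=
  (pvDedupA [] L).map (fun n => (n, (L.count n : Int)))

-- the weighted ops a frontier's items generate in one layer
def pvOpsOf (md : List (String × List String)) (items : List (String × Int)) : List (String × Int) :=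
  items.flatMap (fun p => (pvKidsL md p.1).map (fun c => (c, p.2)))

theorem pvW_append (a b : List (String × Int)) (k : String) :
    pvW (a ++ b) k = pvW a k + pvW b k := by
  induction a with
  | nil => simp [pvW]
  | cons p a ih => simp [pvW, ih]; ring

theorem pvW_mapw (kids : List String) (w : Int) (k : String) :
    pvW (kids.map (fun c => (c, w))) k = w * (kids.count k : Int) := by
  induction kids with
  | nil => simp [pvW]
  | cons c kids ih =>
      simp only [List.map_cons, pvW, ih, List.count_cons]
      by_cases h : c = k <;> simp [h] <;> push_cast <;> ring

theorem pvW_ones (L : List String) (k : String) :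
    pvW (pvOnes L) k = (L.count k : Int) := by
  simpa using pvW_mapw L 1 k

theorem pvApply_append (d : PySem.Dict String Int) (a b : List (String × Int)) :
    pvApply d (a ++ b) = pvApply (pvApply d a) b := by
  simp [pvApply, List.foldl_append]

theorem pvApply_nodup (d : PySem.Dict String Int) (ops : List (String × Int))
    (h : d.keys.Nodup) : (pvApply d ops).keys.Nodup :=
  PySem.Dict.nodup_keys_foldl_insert_key ops (fun p => p.1) (fun d p => d.getD p.1 0 + p.2) d h

theorem pvDedupA_congr (xs : List String) : ∀ (s s' : List String),
    (∀ y, s.contains y = s'.contains y) → pvDedupA s xs = pvDedupA s' xs := by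
  induction xs with
  | nil => intro s s' h; rfl
  | cons x xs ih =>
      intro s s' h
      simp only [pvDedupA, h x]
      by_cases hc : s'.contains x = true
      · simp only [hc, if_true]
        exact ih s s' h
      · simp only [hc, Bool.false_eq_true, if_false]
        rw [ih (x :: s) (x :: s') (fun y => by simp only [List.contains_cons, h y])]

theorem pvDedupA_not_mem_seen (xs : List String) : ∀ (seen : List String) (x : String),
    x ∈ pvDedupA seen xs → seen.contains x = false := by
  induction xs with
  | nil => intro seen x hx; simp [pvDedupA] at hx
  | cons y xs ih =>
      intro seen x hx
      simp only [pvDedupA] at hx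
      by_cases hc : seen.contains y = true
      · rw [if_pos hc] at hx; exact ih seen x hx
      · rw [if_neg hc] at hx
        rcases List.mem_cons.mp hx with h | h
        · subst h; simpa using hc
        · have := ih (y :: seen) x h
          simp only [List.contains_cons, Bool.or_eq_false_iff] at this
          exact this.2

theorem pvDedupA_append (b : List String) : ∀ (a seen : List String),
    pvDedupA seen (a ++ b) = pvDedupA seen a ++ pvDedupA (a ++ seen) b := by
  intro a
  induction a with
  | nil => intro seen; simp [pvDedupA]
  | cons x a ih =>
      intro seen
      simp only [List.cons_append, pvDedupA]
      by_cases hc : seen.contains x = true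
      · rw [if_pos hc, if_pos hc, ih seen]
        congr 1
        apply pvDedupA_congr
        intro y
        simp only [List.cons_append, List.contains_cons, List.contains_append]
        by_cases hy : y = x
        · subst hy
          have hx : y ∈ seen := by simpa using hc
          simp [hx]
        · have hb : (y == x) = false := by simpa using hy
          simp [hb]
      · rw [if_neg hc, if_neg hc, List.cons_append, ih (x :: seen)]
        congr 2
        apply pvDedupA_congr
        intro y
        simp only [List.cons_append, List.contains_cons, List.contains_append]
        simp [Bool.or_comm, Bool.or_left_comm, Bool.or_assoc]

theorem pvDedupA_eq_filter (xs : List String) : ∀ (s t : List String),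
    pvDedupA (s ++ t) xs = (pvDedupA t xs).filter (fun y => !(s.contains y)) := by
  induction xs with
  | nil => intro s t; rfl
  | cons x xs ih =>
      intro s t
      simp only [pvDedupA, List.contains_append]
      by_cases ht : t.contains x = true
      · simp only [ht, Bool.or_true, if_true]
        exact ih s t
      · simp only [ht, Bool.or_false]
        by_cases hs : s.contains x = true
        · simp only [hs, if_true, List.filter_cons, Bool.not_true, Bool.false_eq_true, if_false]
          have hcg : pvDedupA (s ++ t) xs = pvDedupA (s ++ x :: t) xs := by
            apply pvDedupA_congr
            intro y
            simp only [List.contains_append, List.contains_cons]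
            by_cases hy : y = x
            · subst hy
              have hy' : y ∈ s := by simpa using hs
              simp [hy']
            · have hb : (y == x) = false := by simpa using hy
              simp [hb]
          rw [hcg, ih s (x :: t)]
        · simp only [hs, Bool.false_eq_true, if_false, List.filter_cons, Bool.not_false, if_true]
          have hcg : pvDedupA (x :: (s ++ t)) xs = pvDedupA (s ++ x :: t) xs := by
            apply pvDedupA_congr
            intro y
            simp only [List.contains_cons, List.contains_append]
            simp [Bool.or_comm, Bool.or_left_comm, Bool.or_assoc]
          rw [hcg, ih s (x :: t)]

theorem pvDedupA_seen_filter (xs seen : List String) :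
    pvDedupA seen xs = (pvDedupA [] xs).filter (fun y => !(seen.contains y)) := by
  have := pvDedupA_eq_filter xs seen []
  simpa using this

theorem pvDedupA_all_seen (xs : List String) : ∀ (seen : List String),
    (∀ x ∈ xs, seen.contains x = true) → pvDedupA seen xs = [] := by
  induction xs with
  | nil => intro seen _; rfl
  | cons x xs ih =>
      intro seen h
      simp only [pvDedupA, h x (List.mem_cons_self ..), if_true]
      exact ih seen (fun y hy => h y (List.mem_cons_of_mem _ hy))

theorem pvDedupA_flat (md : List (String × List String)) : ∀ (M s t : List String),
    (∀ n, t.contains n = true → ∀ c ∈ pvKidsL md n, s.contains c = true) →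
    pvDedupA s ((pvDedupA t M).flatMap (pvKidsL md)) = pvDedupA s (M.flatMap (pvKidsL md)) := by
  intro M
  induction M with
  | nil => intro s t _; rfl
  | cons n M ih =>
      intro s t hst
      simp only [pvDedupA, List.flatMap_cons]
      by_cases hc : t.contains n = true
      · rw [if_pos hc, pvDedupA_append]
        have h1 : pvDedupA s (pvKidsL md n) = [] :=
          pvDedupA_all_seen _ _ (fun c hc' => hst n hc c hc')
        have h2 : pvDedupA (pvKidsL md n ++ s) (M.flatMap (pvKidsL md))
            = pvDedupA s (M.flatMap (pvKidsL md)) := by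
          apply pvDedupA_congr
          intro y
          simp only [List.contains_append]
          by_cases hy : (pvKidsL md n).contains y = true
          · have hmem : y ∈ pvKidsL md n := by simpa using hy
            have hs' : y ∈ s := by simpa using hst n hc y hmem
            simp [hy, hs']
          · have hyn : ¬ y ∈ pvKidsL md n := by simpa using hy
            simp [hyn]
        rw [ih s t hst, h2, h1, List.nil_append]
      · rw [if_neg hc]
        simp only [List.flatMap_cons]
        rw [pvDedupA_append, pvDedupA_append]
        congr 1
        rw [ih (pvKidsL md n ++ s) (n :: t) ?_]
        intro n' hn' c hc'
        simp only [List.contains_cons, Bool.or_eq_true] at hn'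
        simp only [List.contains_append, Bool.or_eq_true]
        rcases hn' with h | h
        · left
          have : n' = n := by simpa using h
          subst this
          simpa using hc'
        · right
          exact hst n' h c hc'

theorem pvApply_items (ops : List (String × Int)) : ∀ (d : PySem.Dict String Int),
    d.keys.Nodup →
    (pvApply d ops).items
      = d.items.map (fun p => (p.1, p.2 + pvW ops p.1))
        ++ (pvDedupA d.keys (ops.map (fun p => p.1))).map (fun k => (k, pvW ops k)) := by
  induction ops with
  | nil =>
      intro d _
      simp [pvApply, pvW, pvDedupA]
  | cons p ops ih =>
      intro d hnd
      obtain ⟨k, w⟩ := p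
      have hstep : pvApply d ((k, w) :: ops) = pvApply (d.insert k (d.getD k 0 + w)) ops := rfl
      rw [hstep, ih _ (PySem.Dict.nodup_keys_insert d k _ hnd)]
      by_cases hc : d.contains k = true
      · rw [PySem.Dict.items_insert_of_contains d _ hc, PySem.Dict.keys_insert_of_contains d _ hc]
        simp only [List.map_map, List.map_cons, pvW]
        congr 1
        · apply List.map_congr_left
          rintro ⟨q1, q2⟩ hq
          simp only [Function.comp]
          by_cases hqk : (q1 == k) = true
          · have hqk' : q1 = k := by simpa using hqk
            subst hqk'
            have hget : d.getD q1 0 = q2 := PySem.Dict.getD_of_mem_items d hq hnd 0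
            simp [hget, add_assoc]
          · have hne : ¬ k = q1 := fun h => absurd (by simpa using h.symm) hqk
            simp [hqk, hne]
        · have hk : k ∈ d.keys := (PySem.Dict.contains_iff_mem_keys d k).mp hc
          have hkc : d.keys.contains k = true := by simpa using hk
          simp only [pvDedupA, hkc, if_true]
          apply List.map_congr_left
          intro k' hk'
          have hns := pvDedupA_not_mem_seen _ _ _ hk'
          have hne : ¬ k = k' := by
            intro h
            subst h
            rw [hkc] at hns
            exact absurd hns (by simp)
          simp [hne]
      · have hcf : d.contains k = false := by simpa using hc
        have hknot : ¬ k ∈ d.keys := fun hmem => by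
          simp [(PySem.Dict.contains_iff_mem_keys d k).mpr hmem] at hcf
        have hkc : d.keys.contains k = false := by simpa using hknot
        rw [PySem.Dict.items_insert_of_not_contains d _ hcf,
            PySem.Dict.keys_insert_of_not_contains d _ hcf,
            PySem.Dict.getD_of_not_contains d 0 hcf]
        simp only [List.map_append, List.map_cons, List.map_nil, pvW]
        simp only [pvDedupA, hkc, Bool.false_eq_true, if_false]
        rw [List.append_assoc]
        congr 1
        · apply List.map_congr_left
          rintro ⟨q1, q2⟩ hq
          have hqk : ¬ k = q1 := by
            intro h
            have hmem : q1 ∈ d.keys := List.mem_map_of_mem hq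
            rw [← h] at hmem
            exact hknot hmem
          simp [hqk]
        · have hseen : pvDedupA (d.keys ++ [k]) (ops.map (fun p => p.1))
              = pvDedupA (k :: d.keys) (ops.map (fun p => p.1)) := by
            apply pvDedupA_congr
            intro y
            simp only [List.contains_append, List.contains_cons, List.contains_cons]
            cases hb : (y == k) <;> simp [hb, Bool.or_comm]
          rw [hseen]
          simp only [List.cons_append, List.nil_append]
          congr 1
          · simp
          · apply List.map_congr_left
            intro k' hk'
            have hns := pvDedupA_not_mem_seen _ _ _ hk'
            have hne : ¬ k = k' := by
              intro h
              subst h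
              simp [List.contains_cons] at hns
            simp [hne]

theorem pvApply_ext (o1 o2 : List (String × Int))
    (hW : ∀ k, pvW o1 k = pvW o2 k)
    (hD : pvDedupA [] (o1.map (fun p => p.1)) = pvDedupA [] (o2.map (fun p => p.1)))
    (d : PySem.Dict String Int) (h : d.keys.Nodup) :
    pvApply d o1 = pvApply d o2 := by
  apply PySem.Dict.ext
  rw [pvApply_items o1 d h, pvApply_items o2 d h]
  congr 1
  · apply List.map_congr_left
    intro p _
    rw [hW]
  · rw [pvDedupA_seen_filter (o1.map (fun p => p.1)) d.keys,
        pvDedupA_seen_filter (o2.map (fun p => p.1)) d.keys, hD]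
    apply List.map_congr_left
    intro k _
    rw [hW]

theorem pvSum_filter_split (f : String → Int) (n : String) (seen : List String)
    (hns : seen.contains n = false) : ∀ (L : List String),
    ((L.filter (fun m => !(seen.contains m))).map f).sum
      = (L.count n : Int) * f n
        + ((L.filter (fun m => !((n :: seen).contains m))).map f).sum := by
  intro L
  induction L with
  | nil => simp
  | cons x L ih =>
      by_cases hx : x = n
      · subst hx
        have h1 : (seen.contains x) = false := hns
        simp only [List.filter_cons, List.count_cons, h1, Bool.not_false, if_true,
          List.contains_cons, BEq.rfl, Bool.true_or, Bool.not_true, Bool.false_eq_true, if_false,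
          List.map_cons, List.sum_cons, beq_self_eq_true]
        rw [ih]
        simp only [List.contains_cons]
        push_cast
        ring
      · have hbx : (x == n) = false := by simpa using (fun h => hx (by simpa using h))
        have hbx' : (n == x) = false := by
          simpa using (fun h => hx (by simpa using h.symm))
        simp only [List.filter_cons, List.count_cons, List.contains_cons, hbx, hbx',
          Bool.false_or, List.map_cons, List.sum_cons]
        cases hsx : seen.contains x with
        | false =>
            simp only [Bool.not_false, if_true, List.map_cons, List.sum_cons]
            rw [ih]
            simp only [List.contains_cons]
            push_cast
            ring
        | true =>
            simp only [Bool.not_true, Bool.false_eq_true, if_false]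
            rw [ih]
            simp only [List.contains_cons]
            push_cast
            ring

theorem pvSum_dedup (f : String → Int) : ∀ (M seen : List String),
    ((pvDedupA seen M).map (fun m => (M.count m : Int) * f m)).sum
      = ((M.filter (fun m => !(seen.contains m))).map f).sum := by
  intro M
  induction M with
  | nil => intro seen; simp [pvDedupA]
  | cons n M ih =>
      intro seen
      by_cases hc : seen.contains n = true
      · simp only [pvDedupA, hc, if_true, List.filter_cons, Bool.not_true, Bool.false_eq_true,
          if_false]
        have hmaps : (pvDedupA seen M).map (fun m => ((n :: M).count m : Int) * f m)
            = (pvDedupA seen M).map (fun m => (M.count m : Int) * f m) := by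
          apply List.map_congr_left
          intro m hm
          have hms := pvDedupA_not_mem_seen _ _ _ hm
          have hmn : (m == n) = false := by
            rcases hb : (m == n) with _ | _
            · rfl
            · have : m = n := by simpa using hb
              subst this
              rw [hc] at hms
              cases hms
          have hne : ¬ n = m := fun h => by subst h; simp at hmn
          simp [List.count_cons, hmn, hne]
        rw [hmaps, ih seen]
      · have hcf : seen.contains n = false := by simpa using hc
        simp only [pvDedupA, hcf, Bool.false_eq_true, if_false, List.filter_cons, Bool.not_false,
          if_true, List.map_cons, List.sum_cons]
        have hmaps : (pvDedupA (n :: seen) M).map (fun m => ((n :: M).count m : Int) * f m)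
            = (pvDedupA (n :: seen) M).map (fun m => (M.count m : Int) * f m) := by
          apply List.map_congr_left
          intro m hm
          have hms := pvDedupA_not_mem_seen _ _ _ hm
          have hmn : (m == n) = false := by
            rcases hb : (m == n) with _ | _
            · rfl
            · have : m = n := by simpa using hb
              subst this
              simp [List.contains_cons] at hms
          have hne : ¬ n = m := fun h => by subst h; simp at hmn
          simp [List.count_cons, hmn, hne]
        rw [hmaps, ih (n :: seen), pvSum_filter_split f n seen hcf M]
        simp only [List.count_cons, beq_self_eq_true, if_true, List.contains_cons]
        push_cast
        ring

theorem pvCount_flatMap (md : List (String × List String)) (k : String) : ∀ (M : List String),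
    (((M.flatMap (pvKidsL md)).count k : Int))
      = (M.map (fun n => ((pvKidsL md n).count k : Int))).sum := by
  intro M
  induction M with
  | nil => simp
  | cons n M ih =>
      simp only [List.flatMap_cons, List.count_append, List.map_cons, List.sum_cons, ← ih]
      push_cast
      ring

theorem pvW_opsOf (md : List (String × List String)) (k : String) : ∀ (its : List (String × Int)),
    pvW (pvOpsOf md its) k = (its.map (fun p => p.2 * ((pvKidsL md p.1).count k : Int))).sum := by
  intro its
  induction its with
  | nil => simp [pvOpsOf, pvW]
  | cons p its ih =>
      simp only [pvOpsOf, List.flatMap_cons, List.map_cons, List.sum_cons]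
      rw [pvW_append, pvW_mapw]
      simp only [pvOpsOf] at ih
      rw [ih]

theorem pvW_opsOf_canon (md : List (String × List String)) (M : List String) (k : String) :
    pvW (pvOpsOf md (pvCanon M)) k = ((M.flatMap (pvKidsL md)).count k : Int) := by
  rw [pvW_opsOf, pvCanon, List.map_map, pvCount_flatMap]
  have hfe : ((fun p => p.2 * ((pvKidsL md p.1).count k : Int))
        ∘ (fun n => (n, (M.count n : Int))))
      = fun m => (M.count m : Int) * ((pvKidsL md m).count k : Int) := by
    funext m
    simp
  rw [hfe, pvSum_dedup (fun m => ((pvKidsL md m).count k : Int)) M []]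
  simp

theorem pvKeys_opsOf_canon (md : List (String × List String)) (M : List String) :
    (pvOpsOf md (pvCanon M)).map (fun p => p.1) = (pvDedupA [] M).flatMap (pvKidsL md) := by
  simp [pvOpsOf, pvCanon, List.map_flatMap, List.flatMap_map, List.map_map, Function.comp_def]

theorem pvFrontier_canon (md : List (String × List String)) (M : List String) :
    (pvApply PySem.Dict.empty (pvOpsOf md (pvCanon M))).items
      = pvCanon (M.flatMap (pvKidsL md)) := by
  have hnd : (PySem.Dict.empty : PySem.Dict String Int).keys.Nodup := by
    rw [PySem.Dict.keys_empty]; exact List.nodup_nil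
  rw [pvApply_items _ _ hnd]
  have hitems : (PySem.Dict.empty : PySem.Dict String Int).items = [] := rfl
  rw [hitems, PySem.Dict.keys_empty]
  simp only [List.map_nil, List.nil_append]
  rw [pvKeys_opsOf_canon,
      pvDedupA_flat md M [] [] (by intro n hn; simp at hn)]
  show _ = (pvDedupA [] (M.flatMap (pvKidsL md))).map
      (fun n => (n, ((M.flatMap (pvKidsL md)).count n : Int)))
  apply List.map_congr_left
  intro n _
  rw [pvW_opsOf_canon]

theorem pvInnerFold (w : Int) : ∀ (kids : List String) (c₁ c₂ : PySem.Dict String Int),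
    kids.foldl
      (fun p child =>
        (p.1.insert child (p.1.getD child 0 + w), p.2.insert child (p.2.getD child 0 + w)))
      (c₁, c₂)
      = (pvApply c₁ (kids.map (fun c => (c, w))), pvApply c₂ (kids.map (fun c => (c, w)))) := by
  intro kids
  induction kids with
  | nil => intro c₁ c₂; simp [pvApply]
  | cons x kids ih =>
      intro c₁ c₂
      simp only [List.foldl_cons, List.map_cons]
      rw [ih]
      simp [pvApply]

theorem pvLayerFold (md : List (String × List String)) : ∀ (its : List (String × Int))
    (c₁ c₂ : PySem.Dict String Int),
    its.foldl
      (fun acc item =>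
        ((pvGetLinks md item.1).getD []).foldl
          (fun p child =>
            (p.1.insert child (p.1.getD child 0 + item.2),
             p.2.insert child (p.2.getD child 0 + item.2)))
          acc)
      (c₁, c₂)
      = (pvApply c₁ (pvOpsOf md its), pvApply c₂ (pvOpsOf md its)) := by
  intro its
  induction its with
  | nil => intro c₁ c₂; simp [pvOpsOf, pvApply]
  | cons item its ih =>
      intro c₁ c₂
      simp only [List.foldl_cons]
      rw [show ((pvGetLinks md item.1).getD [] : List String) = pvKidsL md item.1 from rfl,
          pvInnerFold item.2 (pvKidsL md item.1) c₁ c₂, ih]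
      simp only [pvOpsOf, List.flatMap_cons, pvApply_append]

theorem pvEmit_nil (md : List (String × List String)) : ∀ (n : Nat), pvEmit md n [] = [] := by
  intro n
  induction n with
  | zero => rfl
  | succ n ih => simp [pvEmit, ih]

theorem pvBLoop_eq (md : List (String × List String)) : ∀ (n : Nat) (M : List String)
    (counts frontier : PySem.Dict String Int),
    counts.keys.Nodup → frontier.items = pvCanon M →
    pvBLoop md n counts frontier = pvApply counts (pvOnes (pvEmit md n M)) := by
  intro n
  induction n with
  | zero => intro M counts frontier _ _; simp [pvBLoop, pvEmit, pvOnes, pvApply]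
  | succ n ih =>
      intro M counts frontier hnd hfr
      simp only [pvBLoop]
      by_cases hemp : frontier.items.isEmpty = true
  -- frontier empty: Python's `and frontier` stops the loop; the remaining stream is empty
      · rw [if_pos hemp]
        have hM : M = [] := by
          cases M with
          | nil => rfl
          | cons x xs =>
              rw [List.isEmpty_iff] at hemp
              rw [hemp] at hfr
              simp [pvCanon, pvDedupA] at hfr
        subst hM
        rw [pvEmit_nil]
        simp [pvOnes, pvApply]
      · rw [if_neg hemp]
        have hlayer : pvBLayer md counts frontier
            = (pvApply counts (pvOpsOf md (pvCanon M)),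
               pvApply PySem.Dict.empty (pvOpsOf md (pvCanon M))) := by
          unfold pvBLayer
          rw [hfr]
          exact pvLayerFold md (pvCanon M) counts PySem.Dict.empty
        rw [hlayer]
        have hckeys : (pvApply counts (pvOpsOf md (pvCanon M))).keys.Nodup :=
          pvApply_nodup _ _ hnd
        rw [ih (M.flatMap (pvKidsL md)) _ _ hckeys (pvFrontier_canon md M)]
        have hops : pvApply counts (pvOpsOf md (pvCanon M))
            = pvApply counts (pvOnes (M.flatMap (pvKidsL md))) := by
          apply pvApply_ext _ _ ?_ ?_ counts hnd
          · intro k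
            rw [pvW_opsOf_canon, pvW_ones]
          · have h1 : (pvOnes (M.flatMap (pvKidsL md))).map (fun p => p.1)
                = M.flatMap (pvKidsL md) := by simp [pvOnes, Function.comp_def]
            rw [h1, pvKeys_opsOf_canon,
                pvDedupA_flat md M [] [] (by intro n' hn'; simp at hn')]
        rw [hops, ← pvApply_append]
        simp only [pvEmit, pvOnes, List.map_append]

theorem pvAFold (subs : List String) : ∀ (conns : PySem.Dict String Int),
    subs.foldl
      (fun c s =>
        let c' := if c.contains s then c else c.insert s 0
        c'.insert s (c'.getD s 0 + 1))
      conns = pvApply conns (pvOnes subs) := by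
  have hstep : ∀ (c : PySem.Dict String Int) (s : String),
      (let c' := if c.contains s then c else c.insert s 0
       c'.insert s (c'.getD s 0 + 1)) = c.insert s (c.getD s 0 + 1) := by
    intro c s
    by_cases hc : c.contains s = true
    · simp [hc]
    · have hcf : c.contains s = false := by simpa using hc
      simp only [hcf, Bool.false_eq_true, if_false]
      rw [PySem.Dict.getD_insert_self, PySem.Dict.insert_insert_self,
          PySem.Dict.getD_of_not_contains c 0 hcf]
  have hfun : (fun (c : PySem.Dict String Int) (s : String) =>
      let c' := if c.contains s then c else c.insert s 0
      c'.insert s (c'.getD s 0 + 1))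
      = fun c s => c.insert s (c.getD s 0 + 1) :=
    funext fun c => funext fun s => hstep c s
  rw [hfun]
  induction subs with
  | nil => intro conns; simp [pvApply, pvOnes]
  | cons s subs ih =>
      intro conns
      simp only [List.foldl_cons]
      rw [ih]
      simp [pvApply, pvOnes]

theorem pvALoop_drain (md : List (String × List String)) (m : Int) : ∀ (q : List (String × Int))
    (conns : PySem.Dict String Int), (∀ p ∈ q, ¬ p.2 < m) → pvALoop md m q conns = conns := by
  intro q
  induction q with
  | nil => intro conns _; rw [pvALoop]
  | cons p q ih =>
      intro conns h
      obtain ⟨k, d⟩ := p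
      have hd : ¬ d < m := h (k, d) (List.mem_cons_self ..)
      rw [pvALoop, dif_neg (fun hcon => hd hcon.1)]
      exact ih conns (fun p hp => h p (List.mem_cons_of_mem _ hp))

theorem pvALoop_layer (md : List (String × List String)) (m : Int) {d : Int} (hd : d < m) :
    ∀ (xs ys : List String) (conns : PySem.Dict String Int),
    pvALoop md m (xs.map (fun k => (k, d)) ++ ys.map (fun k => (k, d + 1))) conns
      = pvALoop md m ((ys ++ xs.flatMap (pvKidsL md)).map (fun k => (k, d + 1)))
          (pvApply conns (pvOnes (xs.flatMap (pvKidsL md)))) := by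
  intro xs
  induction xs with
  | nil =>
      intro ys conns
      simp [pvApply, pvOnes]
  | cons k xs ih =>
      intro ys conns
      simp only [List.map_cons, List.cons_append]
      cases hks : pvGetLinks md k with
      | none =>
          rw [pvALoop, dif_neg (by simp [hks])]
          rw [ih ys conns]
          have hkid : pvKidsL md k = [] := by simp [pvKidsL, hks]
          simp [hkid]
      | some l =>
          rw [pvALoop, dif_pos ⟨hd, by simp [hks]⟩]
          rw [pvAFold]
          have hkid : pvKidsL md k = l := by simp [pvKidsL, hks]
          have hq : (xs.map (fun k => (k, d)) ++ ys.map (fun k => (k, d + 1)))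
                ++ ((pvGetLinks md k).getD []).map (fun s => (s, d + 1))
              = xs.map (fun k => (k, d)) ++ (ys ++ l).map (fun k => (k, d + 1)) := by
            simp [hks, List.map_append]
          rw [hq, ih (ys ++ l)]
          have hgl : (pvGetLinks md k).getD [] = l := by simp [hks]
          rw [hgl]
          have hflat : (k :: xs).flatMap (pvKidsL md) = l ++ xs.flatMap (pvKidsL md) := by
            simp [hkid]
          rw [hflat]
          have happ : pvApply (pvApply conns (pvOnes l)) (pvOnes (xs.flatMap (pvKidsL md)))
              = pvApply conns (pvOnes (l ++ xs.flatMap (pvKidsL md))) := by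
            rw [← pvApply_append]
            simp [pvOnes]
          rw [happ]
          simp [List.append_assoc]

theorem pvALoop_emit (md : List (String × List String)) (m : Int) : ∀ (n : Nat) (d : Int)
    (zs : List String) (conns : PySem.Dict String Int), (m - d).toNat = n →
    pvALoop md m (zs.map (fun k => (k, d))) conns = pvApply conns (pvOnes (pvEmit md n zs)) := by
  intro n
  induction n with
  | zero =>
      intro d zs conns hn
      have hd : ¬ d < m := by omega
      rw [pvALoop_drain md m _ conns (by rintro ⟨k, d'⟩ hp; simp at hp; omega)]
      simp [pvEmit, pvOnes, pvApply]
  | succ n ih =>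
      intro d zs conns hn
      have hd : d < m := by omega
      have h0 : zs.map (fun k => (k, d))
          = zs.map (fun k => (k, d)) ++ ([] : List String).map (fun k => (k, d + 1)) := by simp
      rw [h0, pvALoop_layer md m hd zs [] conns]
      simp only [List.nil_append]
      rw [ih (d + 1) (zs.flatMap (pvKidsL md)) _ (by omega)]
      rw [← pvApply_append]
      simp only [pvEmit, pvOnes, List.map_append]

theorem pvMain (md : List (String × List String)) (key : String) (m : Int) :
    process_links_iteratively md key m = process_links_iteratively_alt md key m := by
  unfold process_links_iteratively process_links_iteratively_alt
  congr 1
  have hA : pvALoop md m [(key, 0)] PySem.Dict.empty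
      = pvApply PySem.Dict.empty (pvOnes (pvEmit md m.toNat [key])) := by
    have h0 : ([(key, 0)] : List (String × Int)) = [key].map (fun k => (k, (0 : Int))) := rfl
    rw [h0]
    exact pvALoop_emit md m m.toNat 0 [key] PySem.Dict.empty (by omega)
  have hB : pvBLoop md m.toNat PySem.Dict.empty (PySem.Dict.empty.insert key 1)
      = pvApply PySem.Dict.empty (pvOnes (pvEmit md m.toNat [key])) := by
    apply pvBLoop_eq md m.toNat [key]
    · rw [PySem.Dict.keys_empty]; exact List.nodup_nil
    · have hcf : (PySem.Dict.empty : PySem.Dict String Int).contains key = false := by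
        simp [PySem.Dict.contains_empty]
      rw [PySem.Dict.items_insert_of_not_contains _ _ hcf]
      rw [show (PySem.Dict.empty : PySem.Dict String Int).items = [] from rfl]
      simp [pvCanon, pvDedupA]
  rw [hA, hB]

theorem process_links_iteratively_spec : Claim_equal_process_links_iteratively := by
  intro md key m _
  unfold Spec_process_links_iteratively
  exact pvMain md key m
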